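-- pv_equiv track=rewrite | github.com/DominikBobos/VUT-FIT-Excel-Fit-2022 | scripts/Playback.py | GetOneFolderUp
-- ===== SOURCE A (Python) =====
-- def GetOneFolderUp(file):
--     """
--     Get one folder up while preserving the filename
--     :param file: filename path
--     :return: the same file in parent folder
--     """
--     processed = ''
--     folders = file.split('/')
--     for idx, folder in enumerate(folders):
--         if idx == len(folders) - 2:  # the last but one item (folder to get away from)
--             continue
--         if idx == len(folders) - 1:  # the last one (file)
--             processed += folder  # filename
--             continue
--         processed += folder + '/'
--     return processed
-- ===== SOURCE B (Python) =====
-- def GetOneFolderUp(file):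
--     """
--     Get one folder up while preserving the filename
--     :param file: filename path
--     :return: the same file in parent folder
--     """
--     head, sep, name = file.rpartition('/')
--     if not sep:
--         return file
--     head2, sep2, _ = head.rpartition('/')
--     return head2 + sep2 + name
-- ===== Notes on version B (the rewrite author's own statement) =====
-- stated objective: idiomatic
-- what changed: A splits the path into a token list and re-joins it in an indexed loop with sentinel branches; B never builds a token list: two rpartition('/') calls slice the raw string around its last two slashes and concatenate the three resulting pieces.
import Mathlib
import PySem

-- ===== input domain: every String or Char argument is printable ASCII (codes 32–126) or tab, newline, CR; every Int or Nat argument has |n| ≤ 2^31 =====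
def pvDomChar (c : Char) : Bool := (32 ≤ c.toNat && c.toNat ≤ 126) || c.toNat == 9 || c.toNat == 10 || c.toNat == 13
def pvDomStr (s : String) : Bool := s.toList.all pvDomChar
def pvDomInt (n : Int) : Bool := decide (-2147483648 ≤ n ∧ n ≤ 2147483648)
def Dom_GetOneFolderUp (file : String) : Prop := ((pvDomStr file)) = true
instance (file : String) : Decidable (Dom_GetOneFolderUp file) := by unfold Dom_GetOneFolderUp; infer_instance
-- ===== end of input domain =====

-- B replaces A's split-into-all-tokens-and-rejoin loop by two rpartition('/') slices around the
-- last two slashes of the raw string (objective: idiomatic; return value only, no mutation).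

-- ===== PORT A =====
def GetOneFolderUp (file : String) : String :=
  let folders := PySem.Chars.splitOn file.toList ['/']
  let n : Int := folders.length
  let processed :=
    (PySem.List.enumerate folders).foldl
      (fun processed ip =>
        if ip.1 = n - 2 then processed
        else if ip.1 = n - 1 then processed ++ ip.2
        else processed ++ ip.2 ++ ['/']) []
  String.ofList processed

-- ===== PORT B =====
-- str.rpartition('/') is ported by hand (exact for this 1-char separator): on the reversed char
-- list, takeWhile (· ≠ '/') is the part after the last '/' and dropWhile reaches that '/' itself.
def GetOneFolderUp_alt (file : String) : String :=
  let r := file.toList.reverse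
  match r.dropWhile (· ≠ '/') with
  | [] => file                       -- no '/' in file: rpartition's sep is '' → return file
  | _ :: rest =>                     -- rest.reverse = head; head2 ++ sep2 = (rest.dropWhile …).reverse
      String.ofList ((rest.dropWhile (· ≠ '/')).reverse ++ (r.takeWhile (· ≠ '/')).reverse)

-- ===== PRECONDITION & SPEC =====
def Spec_GetOneFolderUp (file : String) (out : String) : Prop := out = GetOneFolderUp_alt file
instance (file : String) (out : String) : Decidable (Spec_GetOneFolderUp file out) := by unfold Spec_GetOneFolderUp; infer_instance

-- ===== CLAIM (what is proved, stated in full; the proofs are below) =====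
def Claim_equal_GetOneFolderUp : Prop := ∀ (file : String), Dom_GetOneFolderUp file → Spec_GetOneFolderUp file (GetOneFolderUp file)

-- ===== LEMMAS AND PROOFS =====

def pvSplit : List Char → List (List Char)
  | [] => [[]]
  | c :: rest =>
    if c = '/' then [] :: pvSplit rest
    else
      match pvSplit rest with
      | [] => [[c]]
      | h :: t => (c :: h) :: t
def pvModHead : List Char → List (List Char) → List (List Char)
  | pre, [] => [pre]
  | pre, h :: t => (pre ++ h) :: t
lemma pvSplit_ne_nil (s : List Char) : pvSplit s ≠ [] := by
  cases s with
  | nil => simp [pvSplit]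
  | cons c rest => simp only [pvSplit]; split; · simp
                   · split <;> simp

lemma go_eq : ∀ (fuel : Nat) (l cur : List Char) (acc : List (List Char)), l.length < fuel →
    PySem.Chars.splitOn.go ['/'] fuel l cur acc = acc.reverse ++ pvModHead cur.reverse (pvSplit l) := by
  intro fuel
  induction fuel with
  | zero => intro l cur acc h; omega
  | succ fuel ih =>
      intro l cur acc h
      cases l with
      | nil =>
          rw [PySem.Chars.splitOn.go]
          · simp [pvSplit, pvModHead]
          · omega
      | cons c rest =>
          rw [PySem.Chars.splitOn.go]
          by_cases hc : c = '/'
          · subst hc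
            simp only [List.isPrefixOf, beq_self_eq_true, Bool.true_and, if_pos rfl, List.length_cons, List.drop_succ_cons, List.drop_zero, List.length_nil]
            rw [ih rest [] (cur.reverse :: acc) (by simpa using Nat.lt_of_succ_lt_succ h)]
            simp only [pvSplit, if_pos rfl]
            rcases hps : pvSplit rest with _ | ⟨ph, pt⟩
            · exact absurd hps (pvSplit_ne_nil rest)
            · simp [pvModHead]
          · simp only [List.isPrefixOf, List.length_cons]
            rw [if_neg (by simp [Ne.symm hc])]
            rw [ih rest (c :: cur) acc (by simpa using Nat.lt_of_succ_lt_succ h)]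
            simp only [pvSplit, if_neg hc]
            rcases hps : pvSplit rest with _ | ⟨ph, pt⟩
            · exact absurd hps (pvSplit_ne_nil rest)
            · simp [pvModHead]

lemma splitOn_eq (s : List Char) : PySem.Chars.splitOn s ['/'] = pvSplit s := by
  unfold PySem.Chars.splitOn
  rw [go_eq (s.length + 1) s [] [] (by omega)]
  rcases hps : pvSplit s with _ | ⟨h, t⟩
  · exact absurd hps (pvSplit_ne_nil s)
  · simp [pvModHead]

def pvJoin : List (List Char) → List Char
  | [] => []
  | [a] => a
  | a :: t => a ++ '/' :: pvJoin t

lemma pvJoin_cons (a : List Char) (t : List (List Char)) (ht : t ≠ []) :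
    pvJoin (a :: t) = a ++ '/' :: pvJoin t := by
  cases t with
  | nil => exact absurd rfl ht
  | cons b t' => rfl

lemma pvJoin_pvSplit : ∀ s : List Char, pvJoin (pvSplit s) = s := by
  intro s
  induction s with
  | nil => rfl
  | cons c rest ih =>
      simp only [pvSplit]
      by_cases hc : c = '/'
      · subst hc
        rw [if_pos rfl, pvJoin_cons _ _ (pvSplit_ne_nil rest), ih]
        rfl
      · rw [if_neg hc]
        rcases hps : pvSplit rest with _ | ⟨h, t⟩
        · exact absurd hps (pvSplit_ne_nil rest)
        · rw [hps] at ih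
          cases t with
          | nil => simpa [pvJoin] using ih
          | cons b t' =>
              rw [pvJoin_cons _ _ (List.cons_ne_nil b t')] at ih
              rw [pvJoin_cons _ _ (List.cons_ne_nil b t'), ← ih]
              simp

lemma pvSplit_noslash : ∀ (s p : List Char), p ∈ pvSplit s → '/' ∉ p := by
  intro s
  induction s with
  | nil => intro p hp; simp [pvSplit] at hp; simp [hp]
  | cons c rest ih =>
      intro p hp
      simp only [pvSplit] at hp
      by_cases hc : c = '/'
      · subst hc; rw [if_pos rfl] at hp
        rcases List.mem_cons.mp hp with h1 | h1
        · simp [h1]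
        · exact ih p h1
      · rw [if_neg hc] at hp
        rcases hps : pvSplit rest with _ | ⟨h, t⟩
        · exact absurd hps (pvSplit_ne_nil rest)
        · rw [hps] at hp
          rcases List.mem_cons.mp hp with h1 | h1
          · subst h1
            intro hmem
            rcases List.mem_cons.mp hmem with h2 | h2
            · exact hc h2.symm
            · exact ih h (by rw [hps]; exact List.mem_cons_self) h2
          · exact ih p (by rw [hps]; exact List.mem_cons_of_mem _ h1)

lemma pvJoin_append (q ys : List (List Char)) (hq : q ≠ []) (hy : ys ≠ []) :
    pvJoin (q ++ ys) = pvJoin q ++ '/' :: pvJoin ys := by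
  induction q with
  | nil => exact absurd rfl hq
  | cons a t ih =>
      cases t with
      | nil => rw [List.cons_append, List.nil_append, pvJoin_cons _ _ hy]; rfl
      | cons b t' =>
          rw [List.cons_append, pvJoin_cons _ _ (by simp), pvJoin_cons _ _ (by simp),
              ih (by simp)]
          simp

lemma pv_dropWhile (a z : List Char) (h : '/' ∉ a) :
    (a ++ '/' :: z).dropWhile (· ≠ '/') = '/' :: z := by
  induction a with
  | nil => simp [List.dropWhile]
  | cons c t ih =>
      have hc : c ≠ '/' := fun e => h (e ▸ List.mem_cons_self)
      rw [List.cons_append, List.dropWhile_cons_of_pos (by simpa using hc)]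
      exact ih (fun hm => h (List.mem_cons_of_mem _ hm))

lemma pv_takeWhile (a z : List Char) (h : '/' ∉ a) :
    (a ++ '/' :: z).takeWhile (· ≠ '/') = a := by
  induction a with
  | nil => simp [List.takeWhile]
  | cons c t ih =>
      have hc : c ≠ '/' := fun e => h (e ▸ List.mem_cons_self)
      rw [List.cons_append, List.takeWhile_cons_of_pos (by simpa using hc)]
      rw [ih (fun hm => h (List.mem_cons_of_mem _ hm))]

lemma pv_dropWhile_nil (a : List Char) (h : '/' ∉ a) :
    a.dropWhile (· ≠ '/') = [] := by
  induction a with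
  | nil => rfl
  | cons c t ih =>
      have hc : c ≠ '/' := fun e => h (e ▸ List.mem_cons_self)
      rw [List.dropWhile_cons_of_pos (by simpa using hc)]
      exact ih (fun hm => h (List.mem_cons_of_mem _ hm))

def pvW (n : Int) (ip : Int × List Char) : List Char :=
  if ip.1 = n - 2 then [] else if ip.1 = n - 1 then ip.2 else ip.2 ++ ['/']

lemma pv_foldl_eq_flatMap (n : Int) (l : List (Int × List Char)) (acc : List Char) :
    l.foldl (fun processed ip =>
        if ip.1 = n - 2 then processed
        else if ip.1 = n - 1 then processed ++ ip.2
        else processed ++ ip.2 ++ ['/']) acc = acc ++ l.flatMap (pvW n) := by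
  have hf : (fun (processed : List Char) (ip : Int × List Char) =>
        if ip.1 = n - 2 then processed
        else if ip.1 = n - 1 then processed ++ ip.2
        else processed ++ ip.2 ++ ['/'])
      = fun processed ip => processed ++ pvW n ip := by
    funext processed ip
    unfold pvW
    split_ifs <;> simp
  rw [hf]
  exact PySem.List.foldl_append_eq_flatMap (pvW n) l acc

lemma pv_enum_cons (x : List Char) (t : List (List Char)) (k : Int) :
    PySem.List.enumerate (x :: t) k = (k, x) :: PySem.List.enumerate t (k + 1) := by
  rfl

lemma pv_enum_append (xs ys : List (List Char)) (k : Int) :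
    PySem.List.enumerate (xs ++ ys) k
      = PySem.List.enumerate xs k ++ PySem.List.enumerate ys (k + xs.length) := by
  induction xs generalizing k with
  | nil => simp [PySem.List.enumerate]
  | cons x t ih =>
      rw [List.cons_append, pv_enum_cons, pv_enum_cons, ih (k + 1)]
      simp only [List.length_cons, List.cons_append, List.cons.injEq, true_and]
      congr 2
      push_cast
      omega

lemma pv_flatMap_enum_lt (n : Int) :
    ∀ (q : List (List Char)) (k : Int), k + q.length ≤ n - 2 → 0 ≤ k →
      (PySem.List.enumerate q k).flatMap (pvW n) = q.flatMap (· ++ ['/']) := by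
  intro q
  induction q with
  | nil => intro k _ _; simp [PySem.List.enumerate]
  | cons x t ih =>
      intro k hk hk0
      rw [pv_enum_cons]
      simp only [List.flatMap_cons]
      rw [ih (k + 1) (by simp only [List.length_cons] at hk; push_cast at hk ⊢; omega) (by omega)]
      congr 1
      unfold pvW
      have h1 : ¬ (k = n - 2) := by simp only [List.length_cons] at hk; push_cast at hk; omega
      have h2 : ¬ (k = n - 1) := by simp only [List.length_cons] at hk; push_cast at hk; omega
      simp [h1, h2]

lemma pv_flatMap_slash (q : List (List Char)) (hq : q ≠ []) :
    q.flatMap (· ++ ['/']) = pvJoin q ++ ['/'] := by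
  induction q with
  | nil => exact absurd rfl hq
  | cons a t ih =>
      cases t with
      | nil => simp [pvJoin]
      | cons b t' =>
          rw [List.flatMap_cons, ih (List.cons_ne_nil b t'), pvJoin_cons _ _ (List.cons_ne_nil b t')]
          simp
lemma pv_rev (x z : List Char) : (x ++ '/' :: z).reverse = z.reverse ++ '/' :: x.reverse := by
  simp

lemma pv_alt_nil (file : String)
    (h : file.toList.reverse.dropWhile (· ≠ '/') = []) :
    GetOneFolderUp_alt file = file := by
  simp only [GetOneFolderUp_alt]
  rw [h]

lemma pv_alt_cons (file : String) (c : Char) (rest : List Char)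
    (h : file.toList.reverse.dropWhile (· ≠ '/') = c :: rest) :
    GetOneFolderUp_alt file
      = String.ofList ((rest.dropWhile (· ≠ '/')).reverse
          ++ (file.toList.reverse.takeWhile (· ≠ '/')).reverse) := by
  simp only [GetOneFolderUp_alt]
  rw [h]

theorem pv_main (file : String) : GetOneFolderUp file = GetOneFolderUp_alt file := by
  simp only [GetOneFolderUp, splitOn_eq]
  rw [pv_foldl_eq_flatMap]
  set s := file.toList with hs
  have hjoin : pvJoin (pvSplit s) = s := pvJoin_pvSplit s
  have hns : ∀ p ∈ pvSplit s, '/' ∉ p := fun p hp => pvSplit_noslash s p hp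
  rcases hr : (pvSplit s).reverse with _ | ⟨a, t0⟩
  · exact absurd (by simpa using congrArg List.reverse hr) (pvSplit_ne_nil s)
  · rcases t0 with _ | ⟨b, t⟩
    · -- one token: no '/' in s
      have hps : pvSplit s = [a] := by simpa using congrArg List.reverse hr
      have ha : a = s := by rw [hps] at hjoin; simpa [pvJoin] using hjoin
      have hna : '/' ∉ a := hns a (by rw [hps]; exact List.mem_cons_self)
      have hdw : file.toList.reverse.dropWhile (· ≠ '/') = [] := by
        rw [← hs]
        exact pv_dropWhile_nil _ (fun hm => hna (ha ▸ List.mem_reverse.mp hm))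
      rw [pv_alt_nil file hdw, hps]
      simp only [List.nil_append, List.length_cons, List.length_nil]
      rw [pv_enum_cons]
      simp only [PySem.List.enumerate, pvW, List.flatMap_cons, List.flatMap_nil]
      norm_num
      rw [ha, hs, String.ofList_toList]
    · -- at least two tokens
      have hps : pvSplit s = t.reverse ++ [b, a] := by
        simpa using congrArg List.reverse hr
      set q := t.reverse with hq
      have hna : '/' ∉ a := hns a (by rw [hps]; simp)
      have hnb : '/' ∉ b := hns b (by rw [hps]; simp)
      have hnar : '/' ∉ a.reverse := fun hm => hna (List.mem_reverse.mp hm)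
      have hnbr : '/' ∉ b.reverse := fun hm => hnb (List.mem_reverse.mp hm)
      rw [hps]
      have hlen : ((q ++ [b, a]).length : Int) = (q.length : Int) + 2 := by
        simp [List.length_append]
      rw [pv_enum_append, List.flatMap_append]
      rw [pv_flatMap_enum_lt _ q 0 (by rw [hlen]; push_cast; omega) le_rfl]
      have henum2 : PySem.List.enumerate [b, a] (0 + (q.length : Int))
          = [((q.length : Int), b), ((q.length : Int) + 1, a)] := by
        rw [pv_enum_cons, pv_enum_cons]
        norm_num
      rw [henum2]
      have hwb : pvW ((q ++ [b, a]).length : Int) ((q.length : Int), b) = [] := by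
        unfold pvW; rw [hlen]; simp
      have hwa : pvW ((q ++ [b, a]).length : Int) ((q.length : Int) + 1, a) = a := by
        unfold pvW; rw [hlen]
        have h1 : ¬ ((q.length : Int) + 1 = (q.length : Int) + 2 - 2) := by omega
        rw [if_neg h1, if_pos (by omega)]
      rw [List.flatMap_cons, List.flatMap_cons, hwb, hwa]
      rcases hqq : q with _ | ⟨q0, qt⟩
      · -- exactly two tokens: s = b ++ '/' :: a
        have hsv : s = b ++ '/' :: a := by
          rw [hps, hqq] at hjoin
          simpa [pvJoin] using hjoin.symm
        have hscrut : file.toList.reverse.dropWhile (· ≠ '/') = '/' :: b.reverse := by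
          rw [← hs, hsv, pv_rev]
          exact pv_dropWhile _ _ hnar
        have htw : file.toList.reverse.takeWhile (· ≠ '/') = a.reverse := by
          rw [← hs, hsv, pv_rev]
          exact pv_takeWhile _ _ hnar
        rw [pv_alt_cons file '/' b.reverse hscrut, htw, pv_dropWhile_nil _ hnbr]
        simp
      · -- three or more tokens
        have hqne : q ≠ [] := by rw [hqq]; simp
        rw [← hqq]
        have hsv : s = pvJoin q ++ '/' :: (b ++ '/' :: a) := by
          rw [hps, pvJoin_append q [b, a] hqne (by simp)] at hjoin
          simpa [pvJoin] using hjoin.symm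
        have hrw : s.reverse = a.reverse ++ '/' :: (b.reverse ++ '/' :: (pvJoin q).reverse) := by
          rw [hsv, pv_rev, pv_rev]
          simp
        have hscrut : file.toList.reverse.dropWhile (· ≠ '/')
            = '/' :: (b.reverse ++ '/' :: (pvJoin q).reverse) := by
          rw [← hs, hrw]
          exact pv_dropWhile _ _ hnar
        have htw : file.toList.reverse.takeWhile (· ≠ '/') = a.reverse := by
          rw [← hs, hrw]
          exact pv_takeWhile _ _ hnar
        rw [pv_alt_cons file _ _ hscrut, htw, pv_dropWhile _ _ hnbr,
            pv_flatMap_slash q hqne]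
        simp

-- ===== VERDICT (by name: the statement is the Claim_ definition above) =====
theorem GetOneFolderUp_spec : Claim_equal_GetOneFolderUp := by
  intro file _
  unfold Spec_GetOneFolderUp
  exact pv_main file
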